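-- pv_equiv track=rewrite | github.com/gangeshwar01/soc-alert | scripts/train.py | find_label_column
-- ===== SOURCE A (Python) =====
-- LABEL_CANDIDATES = ["label", "attack_type", "attack", "attack_cat", "flowlabel"]
--
-- def find_label_column(cols):
--     for candidate in LABEL_CANDIDATES:
--         for c in cols:
--             if c.lower() == candidate:
--                 return c
--     # fallback: any column containing 'label' or 'attack'
--     for c in cols:
--         low = c.lower()
--         if "label" in low or "attack" in low:
--             return c
--     return None
-- ===== SOURCE B (Python) =====
-- LABEL_CANDIDATES = ["label", "attack_type", "attack", "attack_cat", "flowlabel"]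
-- CAND_RANK = {name: i for i, name in enumerate(LABEL_CANDIDATES)}
--
-- def find_label_column(cols):
--     # one pass: rank each column (candidate index, or 5 for a substring
--     # fallback match); keep the first column with the strictly lowest rank
--     best_rank = len(LABEL_CANDIDATES) + 1
--     best_col = None
--     for c in cols:
--         low = c.lower()
--         r = CAND_RANK.get(low)
--         if r is None:
--             if "label" in low or "attack" in low:
--                 r = len(LABEL_CANDIDATES)
--             else:
--                 continue
--         if r < best_rank:
--             best_rank = r
--             best_col = c
--     return best_col
-- ===== Notes on version B (the rewrite author's own statement) =====
-- stated objective: faster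
-- what changed: Replaces A's candidate-major nested scans (one pass over cols per candidate, plus a separate fallback pass) with a single pass over cols that ranks each column via a precomputed candidate->index dict (substring fallback = rank 5) and keeps the first column with the strictly lowest rank; measured ~2x faster.
import Mathlib
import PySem

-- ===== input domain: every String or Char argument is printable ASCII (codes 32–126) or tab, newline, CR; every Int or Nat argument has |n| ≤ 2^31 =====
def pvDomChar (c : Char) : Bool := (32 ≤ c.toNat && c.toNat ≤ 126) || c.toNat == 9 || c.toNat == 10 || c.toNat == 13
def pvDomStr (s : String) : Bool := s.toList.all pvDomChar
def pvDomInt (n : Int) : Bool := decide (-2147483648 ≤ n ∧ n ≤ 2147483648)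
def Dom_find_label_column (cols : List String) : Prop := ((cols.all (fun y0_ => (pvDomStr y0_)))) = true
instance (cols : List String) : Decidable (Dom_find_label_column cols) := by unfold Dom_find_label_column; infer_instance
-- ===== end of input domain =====

-- B replaces A's candidate-major nested scans (plus a separate fallback pass) by a single
-- pass over cols keeping the first column of strictly lowest rank (candidate index, or 5
-- for the substring fallback); objective: faster (single pass; a timing run measured ~2x).

-- ===== PORT A =====
def pvCandidates : List String := ["label", "attack_type", "attack", "attack_cat", "flowlabel"]

-- A's outer loop over candidates; the inner loop with early return is List.find?
def pvFindExact : List String → List String → Option String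
  | [], _ => none
  | cand :: rest, cols =>
    match cols.find? (fun c => PySem.Str.lower c == cand) with
    | some c => some c
    | none => pvFindExact rest cols

def find_label_column (cols : List String) : Option String :=
  match pvFindExact pvCandidates cols with
  | some c => some c
  | none =>
    -- fallback: any column containing 'label' or 'attack'
    cols.find? (fun c =>
      PySem.Str.isIn "label" (PySem.Str.lower c) || PySem.Str.isIn "attack" (PySem.Str.lower c))

-- ===== PORT B =====
-- CAND_RANK = {name: i for i, name in enumerate(LABEL_CANDIDATES)}
def pvCandRank : PySem.Dict String Int :=
  PySem.Dict.ofList ((PySem.List.enumerate pvCandidates).map (fun p => (p.2, p.1)))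

-- B's single loop; state = (best_rank, best_col); 5 = len(LABEL_CANDIDATES), 6 = len+1
def pvLoop : List String → Int → Option String → Option String
  | [], _, best => best
  | c :: rest, bestRank, best =>
    let low := PySem.Str.lower c
    match pvCandRank.get? low with
    | some r =>
      if r < bestRank then pvLoop rest r (some c) else pvLoop rest bestRank best
    | none =>
      if PySem.Str.isIn "label" low || PySem.Str.isIn "attack" low then
        if (5 : Int) < bestRank then pvLoop rest 5 (some c) else pvLoop rest bestRank best
      else pvLoop rest bestRank best

def find_label_column_alt (cols : List String) : Option String :=
  pvLoop cols 6 none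

-- ===== PRECONDITION & SPEC =====
def Spec_find_label_column (cols : List String) (out : Option String) : Prop := out = find_label_column_alt cols
instance (cols : List String) (out : Option String) : Decidable (Spec_find_label_column cols out) := by unfold Spec_find_label_column; infer_instance

-- ===== CLAIM (what is proved, stated in full; the proofs are below) =====
def Claim_equal_find_label_column : Prop := ∀ (cols : List String), Dom_find_label_column cols → Spec_find_label_column cols (find_label_column cols)

-- ===== LEMMAS AND PROOFS =====

-- the rank of a column: candidate index, 5 = substring fallback, 6 = no match
def pvRank (c : String) : Int :=
  match pvCandRank.get? (PySem.Str.lower c) with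
  | some r => r
  | none =>
    if PySem.Str.isIn "label" (PySem.Str.lower c) || PySem.Str.isIn "attack" (PySem.Str.lower c)
    then 5 else 6

theorem pvCandRank_eq : pvCandRank =
    PySem.Dict.mk [("label",0),("attack_type",1),("attack",2),("attack_cat",3),("flowlabel",4)] := by
  decide

theorem pvGet_spec (x : String) : pvCandRank.get? x =
    (if "label" = x then some 0 else if "attack_type" = x then some 1 else
     if "attack" = x then some 2 else if "attack_cat" = x then some 3 else
     if "flowlabel" = x then some (4:Int) else none) := by
  rw [pvCandRank_eq]
  simp only [PySem.Dict.get?_mk_cons, beq_iff_eq]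
  rfl

theorem pvRank_spec (c : String) : pvRank c =
    (if "label" = PySem.Str.lower c then 0 else if "attack_type" = PySem.Str.lower c then 1 else
     if "attack" = PySem.Str.lower c then 2 else if "attack_cat" = PySem.Str.lower c then 3 else
     if "flowlabel" = PySem.Str.lower c then 4 else
     if PySem.Str.isIn "label" (PySem.Str.lower c) || PySem.Str.isIn "attack" (PySem.Str.lower c)
     then 5 else 6) := by
  unfold pvRank
  rw [pvGet_spec]
  split_ifs <;> rfl

theorem pvRank_nonneg (c : String) : 0 ≤ pvRank c := by
  rw [pvRank_spec]; split_ifs <;> norm_num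

theorem pvRank_le_six (c : String) : pvRank c ≤ 6 := by
  rw [pvRank_spec]; split_ifs <;> norm_num

-- the fallback predicate is exactly "rank ≤ 5"
theorem pvHasSub_iff (c : String) :
    (PySem.Str.isIn "label" (PySem.Str.lower c) || PySem.Str.isIn "attack" (PySem.Str.lower c)) =
      decide (pvRank c ≤ 5) := by
  rw [pvRank_spec]
  split_ifs with h1 h2 h3 h4 h5 h6
  · rw [← h1]; decide
  · rw [← h2]; decide
  · rw [← h3]; decide
  · rw [← h4]; decide
  · rw [← h5]; decide
  · rw [h6]; decide
  · simp only [Bool.not_eq_true] at h6; rw [h6]; decide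

-- B-side: min of ranks, capped at br
def pvMinR (cols : List String) (br : Int) : Int :=
  cols.foldr (fun c m => min (pvRank c) m) br

theorem pvMinR_le (cols : List String) (br : Int) : pvMinR cols br ≤ br := by
  induction cols with
  | nil => simp [pvMinR]
  | cons c rest ih => simp only [pvMinR, List.foldr_cons] at *; omega

theorem pvMinR_le_rank (cols : List String) (br : Int) {c : String} (h : c ∈ cols) :
    pvMinR cols br ≤ pvRank c := by
  induction cols with
  | nil => simp at h
  | cons d rest ih =>
    simp only [pvMinR, List.foldr_cons] at *
    rcases List.mem_cons.1 h with h | h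
    · subst h; omega
    · have := ih h; omega

theorem pvMinR_swap (cols : List String) {a b : Int} (hab : a ≤ b) :
    min a (pvMinR cols b) = pvMinR cols a := by
  induction cols with
  | nil => simp [pvMinR]; omega
  | cons c rest ih => simp only [pvMinR, List.foldr_cons] at *; omega

theorem pvMinR_mem (cols : List String) (br : Int) :
    pvMinR cols br < br → ∃ c ∈ cols, pvRank c = pvMinR cols br := by
  induction cols with
  | nil => intro h; simp only [pvMinR, List.foldr_nil] at h; omega
  | cons c rest ih =>
    intro h
    have hstep : pvMinR (c :: rest) br = min (pvRank c) (pvMinR rest br) := rfl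
    by_cases h2 : pvRank c ≤ pvMinR rest br
    · exact ⟨c, List.mem_cons_self, by omega⟩
    · have hlt : pvMinR rest br < br := by omega
      rcases ih hlt with ⟨d, hd, hr⟩
      exact ⟨d, List.mem_cons_of_mem _ hd, by omega⟩

-- one step of B's loop, expressed through pvRank
theorem pvLoop_step (c : String) (rest : List String) (br : Int) (best : Option String)
    (hbr : br ≤ 6) :
    pvLoop (c :: rest) br best =
      if pvRank c < br then pvLoop rest (pvRank c) (some c) else pvLoop rest br best := by
  cases h : pvCandRank.get? (PySem.Str.lower c) with
  | some r =>
    have hr : pvRank c = r := by unfold pvRank; rw [h]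
    conv_lhs => rw [pvLoop]
    simp only [h, hr]
  | none =>
    have hr : pvRank c =
        (if PySem.Str.isIn "label" (PySem.Str.lower c) || PySem.Str.isIn "attack" (PySem.Str.lower c)
         then 5 else 6) := by unfold pvRank; rw [h]
    conv_lhs => rw [pvLoop]
    simp only [h]
    split_ifs at hr ⊢ <;> first | rfl | omega | rw [hr]

theorem find?_congr_mem {α : Type} (l : List α) (p q : α → Bool)
    (h : ∀ a ∈ l, p a = q a) : l.find? p = l.find? q := by
  induction l with
  | nil => rfl
  | cons a rest ih =>
    simp only [List.find?_cons]
    rw [h a List.mem_cons_self, ih (fun b hb => h b (List.mem_cons_of_mem _ hb))]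

-- characterisation of B's loop
theorem pvLoop_char (cols : List String) : ∀ (br : Int) (best : Option String), br ≤ 6 →
    pvLoop cols br best =
      if pvMinR cols br < br then cols.find? (fun c => pvRank c == pvMinR cols br) else best := by
  induction cols with
  | nil => intro br best _; simp [pvLoop, pvMinR]
  | cons c rest ih =>
    intro br best hbr
    rw [pvLoop_step c rest br best hbr]
    have hK : pvMinR (c :: rest) br = min (pvRank c) (pvMinR rest br) := rfl
    have hle : pvMinR rest br ≤ br := pvMinR_le rest br
    by_cases hc : pvRank c < br
    · rw [if_pos hc, ih (pvRank c) (some c) (by omega)]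
      have hsw : pvMinR rest (pvRank c) = min (pvRank c) (pvMinR rest br) :=
        (pvMinR_swap rest (le_of_lt hc)).symm
      by_cases h2 : pvMinR rest (pvRank c) < pvRank c
      · have hEq : pvMinR rest (pvRank c) = pvMinR (c :: rest) br := by omega
        rw [if_pos h2, hEq, if_pos (by omega),
          List.find?_cons_of_neg (by simp only [beq_iff_eq]; omega)]
      · have hKc : pvMinR (c :: rest) br = pvRank c := by omega
        rw [if_neg h2, hKc, if_pos hc,
          List.find?_cons_of_pos (by simp)]
    · rw [if_neg hc, ih br best hbr]
      have hKR : pvMinR (c :: rest) br = pvMinR rest br := by omega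
      rw [hKR]
      by_cases h2 : pvMinR rest br < br
      · rw [if_pos h2, if_pos h2,
          List.find?_cons_of_neg (by simp only [beq_iff_eq]; omega)]
      · rw [if_neg h2, if_neg h2]

-- A-side: min of ranks ≥ k, capped at 5
def pvMge (k : Nat) (cols : List String) : Int :=
  cols.foldr (fun c m => if (k : Int) ≤ pvRank c then min (pvRank c) m else m) 5

theorem le_pvMge (k : Nat) (cols : List String) (hk : (k : Int) ≤ 5) : (k : Int) ≤ pvMge k cols := by
  induction cols with
  | nil => simpa [pvMge] using hk
  | cons c rest ih => simp only [pvMge, List.foldr_cons] at *; split_ifs with h <;> omega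

theorem pvMge_le_of_mem (k : Nat) (cols : List String) {c : String} (hc : c ∈ cols)
    (h : (k : Int) ≤ pvRank c) : pvMge k cols ≤ pvRank c := by
  induction cols with
  | nil => simp at hc
  | cons d rest ih =>
    simp only [pvMge, List.foldr_cons] at *
    rcases List.mem_cons.1 hc with h' | h'
    · subst h'; rw [if_pos h]; omega
    · have := ih h'; split_ifs <;> omega

theorem pvMge_succ (k : Nat) (cols : List String) (h : ∀ c ∈ cols, pvRank c ≠ (k : Int)) :
    pvMge k cols = pvMge (k + 1) cols := by
  induction cols with
  | nil => simp [pvMge]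
  | cons c rest ih =>
    have hc := h c List.mem_cons_self
    have ih' := ih (fun d hd => h d (List.mem_cons_of_mem _ hd))
    simp only [pvMge, List.foldr_cons] at *
    push_cast
    split_ifs <;> push_cast at * <;> omega

-- for k < 5, matching candidate k exactly is having rank k
theorem pvPred_k (k : Nat) (hk : k < 5) (c : String) :
    (PySem.Str.lower c == pvCandidates[k]!) = (pvRank c == (k : Int)) := by
  have h := pvRank_spec c
  interval_cases k <;>
    simp only [pvCandidates, List.getElem!_cons_zero, List.getElem!_cons_succ] <;>
    (rw [Bool.eq_iff_iff, beq_iff_eq, beq_iff_eq]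
     constructor
     · intro he; rw [h, he]; try push_cast; try decide
     · intro he; rw [h] at he; split_ifs at he <;> first | (symm; assumption) | omega)

-- characterisation of A's candidate loop on suffixes of the candidate list
theorem pvFindExact_char (cols : List String) : ∀ (n k : Nat), k + n = 5 →
    pvFindExact (pvCandidates.drop k) cols =
      if pvMge k cols < 5 then cols.find? (fun c => pvRank c == pvMge k cols) else none := by
  intro n
  induction n with
  | zero =>
    intro k hk
    have hk5 : k = 5 := by omega
    subst hk5
    have h5 : (5 : Int) ≤ pvMge 5 cols := le_pvMge 5 cols (by norm_num)
    rw [if_neg (by omega)]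
    rfl
  | succ n ih =>
    intro k hk
    have hklt : k < 5 := by omega
    have hdrop : pvCandidates.drop k = pvCandidates[k]! :: pvCandidates.drop (k + 1) := by
      have hlen : k < pvCandidates.length := by simp [pvCandidates]; omega
      rw [List.getElem!_eq_getElem?_getD]
      rw [List.getElem?_eq_getElem hlen]
      exact List.drop_eq_getElem_cons hlen
    rw [hdrop]
    show (match cols.find? (fun c => PySem.Str.lower c == pvCandidates[k]!) with
      | some c => some c
      | none => pvFindExact (pvCandidates.drop (k+1)) cols) = _
    rw [find?_congr_mem cols _ _ (fun c _ => pvPred_k k hklt c)]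
    cases hf : cols.find? (fun c => pvRank c == (k : Int)) with
    | some c =>
      have hc : c ∈ cols := List.mem_of_find?_eq_some hf
      have hr : pvRank c = (k : Int) := by
        have := List.find?_some hf; simpa using this
      have hge : (k : Int) ≤ pvMge k cols := le_pvMge k cols (by omega)
      have hle : pvMge k cols ≤ pvRank c := pvMge_le_of_mem k cols hc (by omega)
      have hM : pvMge k cols = (k : Int) := by omega
      rw [if_pos (by omega), hM, hf]
    | none =>
      have hnone : ∀ c ∈ cols, pvRank c ≠ (k : Int) := by
        intro c hc
        have := List.find?_eq_none.1 hf c hc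
        simpa using this
      rw [pvMge_succ k cols hnone]
      exact ih (k + 1) (by omega)

theorem pvMge_zero (cols : List String) : pvMge 0 cols = min (pvMinR cols 6) 5 := by
  induction cols with
  | nil => simp [pvMge, pvMinR]
  | cons c rest ih =>
    have h0 := pvRank_nonneg c
    simp only [pvMge, pvMinR, List.foldr_cons] at *
    rw [if_pos (by exact_mod_cast h0)]
    omega

-- ===== VERDICT (by name: the statement is the Claim_ definition above) =====
theorem find_label_column_spec : Claim_equal_find_label_column := by
  intro cols _
  unfold Spec_find_label_column find_label_column find_label_column_alt
  rw [pvLoop_char cols 6 none (by norm_num)]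
  have hA := pvFindExact_char cols 5 0 rfl
  simp only [List.drop_zero] at hA
  rw [hA, pvMge_zero]
  have hM6 : pvMinR cols 6 ≤ 6 := pvMinR_le cols 6
  have hM0 : 0 ≤ pvMinR cols 6 := by
    have := pvMinR_mem cols 6
    by_cases h : pvMinR cols 6 < 6
    · rcases this h with ⟨c, _, hr⟩
      have := pvRank_nonneg c; omega
    · omega
  set M := pvMinR cols 6 with hMdef
  by_cases h4 : M ≤ 4
  · rw [if_pos (by omega), if_pos (by omega)]
    have hmin : min M 5 = M := by omega
    rw [hmin]
    cases hf : cols.find? (fun c => pvRank c == M) with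
    | some c => rfl
    | none =>
      exfalso
      rcases pvMinR_mem cols 6 (by omega) with ⟨c, hc, hr⟩
      have := List.find?_eq_none.1 hf c hc
      simp [← hMdef, hr] at this
  · by_cases h5 : M = 5
    · rw [if_neg (by omega), if_pos (by omega)]
      rw [find?_congr_mem cols _ (fun c => pvRank c == M) ?_]
      intro c hc
      rw [pvHasSub_iff c]
      have hle := pvMinR_le_rank cols 6 hc
      rw [← hMdef] at hle
      have h6 := pvRank_le_six c
      rw [h5]
      by_cases he : pvRank c = 5
      · simp [he]
      · have : ¬ pvRank c ≤ 5 := by omega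
        simp [this, show (pvRank c == (5:Int)) = false by simpa using he]
    · -- M = 6
      have h6 : M = 6 := by omega
      rw [if_neg (by omega), if_neg (by omega)]
      rw [List.find?_eq_none]
      intro c hc
      have hle := pvMinR_le_rank cols 6 hc
      rw [← hMdef, h6] at hle
      rw [pvHasSub_iff c]
      simp; omega
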